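-- pv_equiv track=rewrite | github.com/cbakgly/TripitakaPlatform | sutradata/common.py | judge_merge_text_punct
-- ===== SOURCE A (Python) =====
-- def judge_merge_text_punct(text, punct_lst):
--     i = 0
--     punct_idx = 0
--     text_length = len(text)
--     punct_lst_length = len(punct_lst)
--     result_lst = []
--     line = []
--     while i < text_length and punct_idx < punct_lst_length:
--         if punct_lst[punct_idx][0] <= i:
--             s = punct_lst[punct_idx][1]
--             if s == '\n':
--                 result_lst.append(''.join(line))
--                 line = []
--             else:
--                 line.append(s)
--             punct_idx += 1
--         elif punct_lst[punct_idx][0] > i: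
--             line.append(text[i])
--             i += 1
--     return result_lst
-- ===== SOURCE B (Python) =====
-- def judge_merge_text_punct(text, punct_lst):
--     # punct-driven pass: bulk-copy text between punctuation positions
--     n = len(text)
--     result = []
--     line = []
--     i = 0
--     for p, s in punct_lst:
--         j = max(i, min(p, n))
--         line.append(text[i:j])
--         i = j
--         if i >= n:
--             break
--         if s == '\n':
--             result.append(''.join(line))
--             line = []
--         else:
--             line.append(s)
--     return result
-- ===== Notes on version B (the rewrite author's own statement) =====
-- stated objective: alternative
-- what changed: Replaced A's two-pointer while loop that appends one text character per iteration with a single pass over punct_lst that bulk-copies the text slice up to each punctuation position and breaks when the text is exhausted.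
import Mathlib
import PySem

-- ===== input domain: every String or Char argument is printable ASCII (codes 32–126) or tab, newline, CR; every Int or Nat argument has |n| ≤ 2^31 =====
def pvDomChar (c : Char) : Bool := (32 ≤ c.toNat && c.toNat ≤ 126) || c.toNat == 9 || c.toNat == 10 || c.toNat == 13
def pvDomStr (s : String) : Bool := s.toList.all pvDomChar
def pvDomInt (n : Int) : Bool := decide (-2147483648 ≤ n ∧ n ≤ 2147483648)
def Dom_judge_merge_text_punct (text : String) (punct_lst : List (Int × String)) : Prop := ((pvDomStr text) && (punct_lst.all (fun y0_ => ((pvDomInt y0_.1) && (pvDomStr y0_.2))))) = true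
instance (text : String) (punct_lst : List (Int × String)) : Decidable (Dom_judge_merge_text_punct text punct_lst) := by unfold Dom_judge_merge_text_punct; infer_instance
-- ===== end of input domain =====

-- B replaces A's two-pointer char-by-char state machine by a punct-driven pass that
-- bulk-copies the text slice before each punctuation position (objective: alternative).

-- ===== PORT A =====
-- literal transliteration of A's while loop: two cursors i (text) and pidx (punct list);
-- `line` is Python's list of strings/chars (chars kept as singleton strings), joined on flush.
def judgeA_loop (t : List Char) (pl : List (Int × String)) (i pidx : Nat)
    (res line : List String) : List String :=
  if h : i < t.length ∧ pidx < pl.length then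
    if (pl[pidx]'h.2).1 ≤ (i : Int) then
      if (pl[pidx]'h.2).2 = "\n" then
        judgeA_loop t pl i (pidx + 1) (res ++ [String.join line]) []
      else
        judgeA_loop t pl i (pidx + 1) res (line ++ [(pl[pidx]'h.2).2])
    else
      judgeA_loop t pl (i + 1) pidx res (line ++ [String.singleton (t[i]'h.1)])
  else res
termination_by (t.length - i) + (pl.length - pidx)
decreasing_by all_goals omega

def judge_merge_text_punct (text : String) (punct_lst : List (Int × String)) : List String :=
  judgeA_loop text.toList punct_lst 0 0 [] []

-- ===== PORT B =====
-- transliteration of Source B: for each (p, s), append the slice text[i:max(i, min(p, n))]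
-- (exact hand-port of the slice: here 0 ≤ i ≤ j ≤ n, so it is (drop i).take (j - i)),
-- break when the text is exhausted, otherwise emit the symbol.
def judgeB_loop (t : List Char) (n : Nat) (pl : List (Int × String)) (i : Nat)
    (res line : List String) : List String :=
  match pl with
  | [] => res
  | (p, s) :: rest =>
    let j := (max (i : Int) (min p (n : Int))).toNat
    let line' := line ++ [String.ofList ((t.drop i).take (j - i))]
    if n ≤ j then res
    else if s = "\n" then judgeB_loop t n rest j (res ++ [String.join line']) []
    else judgeB_loop t n rest j res (line' ++ [s])

def judge_merge_text_punct_alt (text : String) (punct_lst : List (Int × String)) : List String :=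
  judgeB_loop text.toList text.toList.length punct_lst 0 [] []

-- ===== PRECONDITION & SPEC =====
def Spec_judge_merge_text_punct (text : String) (punct_lst : List (Int × String)) (out : List String) : Prop := out = judge_merge_text_punct_alt text punct_lst
instance (text : String) (punct_lst : List (Int × String)) (out : List String) : Decidable (Spec_judge_merge_text_punct text punct_lst out) := by unfold Spec_judge_merge_text_punct; infer_instance

-- ===== CLAIM (what is proved, stated in full; the proofs are below) =====
def Claim_equal_judge_merge_text_punct : Prop := ∀ (text : String) (punct_lst : List (Int × String)), Dom_judge_merge_text_punct text punct_lst → Spec_judge_merge_text_punct text punct_lst (judge_merge_text_punct text punct_lst)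

-- ===== LEMMAS AND PROOFS =====

theorem pv_join_append (l : List String) (s : String) :
    String.join (l ++ [s]) = String.join l ++ s := by
  simp [String.join, List.foldl_append]

theorem pv_sing (c : Char) (cs : List Char) :
    String.singleton c ++ String.ofList cs = String.ofList (c :: cs) := by
  apply String.ext; simp [String.singleton]

theorem pv_join_map_singleton (l : List String) (cs : List Char) :
    String.join (l ++ cs.map String.singleton) = String.join l ++ String.ofList cs := by
  induction cs generalizing l with
  | nil => simp
  | cons c cs ih =>
    have h : l ++ (c :: cs).map String.singleton = (l ++ [String.singleton c]) ++ cs.map String.singleton := by simp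
    rw [h, ih, pv_join_append, String.append_assoc, pv_sing]

-- A's char-copy phase: while the next punct position is ahead, A appends text chars
-- one by one until i reaches j := min p n.
theorem pv_copy (t : List Char) (pl : List (Int × String)) (p : Int) (s : String) :
    ∀ (d i pidx : Nat), pl[pidx]? = some (p, s) → (i : Int) ≤ p → i ≤ t.length →
      (min p (t.length : Int)).toNat - i = d →
      ∀ res line, judgeA_loop t pl i pidx res line =
        judgeA_loop t pl ((min p (t.length : Int)).toNat) pidx res
          (line ++ ((t.drop i).take ((min p (t.length : Int)).toNat - i)).map String.singleton) := by
  intro d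
  induction d with
  | zero =>
    intro i pidx hget hip hin hd res line
    have hj : (min p (t.length : Int)).toNat = i := by omega
    rw [hj]
    simp
  | succ d ih =>
    intro i pidx hget hip hin hd res line
    have hpidx : pidx < pl.length := (List.getElem?_eq_some_iff.mp hget).1
    have hpl : pl[pidx]'hpidx = (p, s) := (List.getElem?_eq_some_iff.mp hget).2
    have hij : i < (min p (t.length : Int)).toNat := by omega
    have hin' : i < t.length := by omega
    have hlt : (i : Int) < p := by omega
    rw [judgeA_loop, dif_pos ⟨hin', hpidx⟩]
    simp only [hpl]
    rw [if_neg (by omega)]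
    rw [ih (i + 1) pidx hget (by omega) (by omega) (by omega)]
    congr 1
    rw [List.append_assoc]
    congr 1
    have hdrop : t.drop i = t[i] :: t.drop (i + 1) := List.drop_eq_getElem_cons hin'
    have htk : (min p (t.length : Int)).toNat - i = ((min p (t.length : Int)).toNat - (i + 1)) + 1 := by omega
    rw [hdrop, htk, List.take_succ_cons, List.map_cons]
    simp

theorem pv_main (t : List Char) (pl : List (Int × String)) :
    ∀ (k pidx : Nat), pl.length - pidx ≤ k →
    ∀ (i : Nat) (res lineA lineB : List String), i ≤ t.length →
      String.join lineA = String.join lineB →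
      judgeA_loop t pl i pidx res lineA = judgeB_loop t t.length (pl.drop pidx) i res lineB := by
  intro k
  induction k with
  | zero =>
    intro pidx hk i res lineA lineB hin hjoin
    rw [List.drop_of_length_le (by omega), judgeA_loop, dif_neg (by omega)]
    rfl
  | succ k ih =>
    intro pidx hk i res lineA lineB hin hjoin
    by_cases hpidx : pidx < pl.length
    · rcases hpl : pl[pidx]'hpidx with ⟨p, s⟩
      have hdrop : pl.drop pidx = (p, s) :: pl.drop (pidx + 1) := by
        rw [List.drop_eq_getElem_cons hpidx, hpl]
      rw [hdrop]
      simp only [judgeB_loop]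
      by_cases hp : p ≤ (i : Int)
      · have hj : (max (i : Int) (min p (t.length : Int))).toNat = i := by omega
        rw [hj]
        have hline' : String.join (lineB ++ [String.ofList ((t.drop i).take (i - i))]) =
            String.join lineB := by
          simp [pv_join_append]
        by_cases hi : i < t.length
        · rw [if_neg (by omega), judgeA_loop, dif_pos ⟨hi, hpidx⟩]
          simp only [hpl, if_pos hp]
          by_cases hs : s = "\n"
          · rw [if_pos hs, if_pos hs, hjoin, ← hline']
            exact ih (pidx + 1) (by omega) i _ [] [] hin rfl
          · rw [if_neg hs, if_neg hs]
            exact ih (pidx + 1) (by omega) i _ _ _ hin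
              (by rw [pv_join_append, pv_join_append, hjoin, hline'])
        · rw [if_pos (by omega), judgeA_loop, dif_neg (by omega)]
      · have hget : pl[pidx]? = some (p, s) := List.getElem?_eq_some_iff.mpr ⟨hpidx, hpl⟩
        have hip : (i : Int) ≤ p := by omega
        have hj : (max (i : Int) (min p (t.length : Int))).toNat =
            (min p (t.length : Int)).toNat := by omega
        rw [hj]
        rw [pv_copy t pl p s ((min p (t.length : Int)).toNat - i) i pidx hget hip hin rfl]
        have hline' : String.join (lineA ++
              ((t.drop i).take ((min p (t.length : Int)).toNat - i)).map String.singleton) =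
            String.join (lineB ++
              [String.ofList ((t.drop i).take ((min p (t.length : Int)).toNat - i))]) := by
          rw [pv_join_map_singleton, pv_join_append, hjoin]
        by_cases hjn : (min p (t.length : Int)).toNat < t.length
        · have hpj : p ≤ ((min p (t.length : Int)).toNat : Int) := by omega
          rw [if_neg (by omega), judgeA_loop, dif_pos ⟨hjn, hpidx⟩]
          simp only [hpl, if_pos hpj]
          by_cases hs : s = "\n"
          · rw [if_pos hs, if_pos hs, hline']
            exact ih (pidx + 1) (by omega) _ _ [] [] (by omega) rfl
          · rw [if_neg hs, if_neg hs]
            exact ih (pidx + 1) (by omega) _ _ _ _ (by omega)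
              (by rw [pv_join_append, pv_join_append, hline'])
        · rw [if_pos (by omega), judgeA_loop, dif_neg (by omega)]
    · rw [List.drop_of_length_le (by omega), judgeA_loop, dif_neg (by omega)]
      rfl

-- ===== VERDICT (by name: the statement is the Claim_ definition above) =====
theorem judge_merge_text_punct_spec : Claim_equal_judge_merge_text_punct := by
  intro text punct_lst _
  unfold Spec_judge_merge_text_punct judge_merge_text_punct judge_merge_text_punct_alt
  simpa using pv_main text.toList punct_lst punct_lst.length 0 (by omega) 0 [] [] [] (by omega) rfl
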